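-- pv_equiv track=rewrite | github.com/newbieeashish/LeetCode_Algo | 2nd_35_questions/ReformatString.py | ReformatString
-- ===== SOURCE A (Python) =====
-- def ReformatString(s):
--     a_group, b_group = [], []
--     for char in s:
--         if 96 < ord(char) < 123: # same as if 'a' <= char <= 'z'
--             a_group.append(char)
--         else:
--             b_group.append(char)
--
--     if len(a_group) < len(b_group): # if the second group length is higher we swap
--         a_group, b_group = b_group, a_group
--
--     if len(a_group) - len(b_group) > 1: # if the length difference is more than one, not possible, return ''
--         return ''
--
--     reformatted = ''
--     for index in range(len(a_group) + len(b_group)):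
--         if not index & 1:
--             reformatted += a_group[index >> 1]
--         else:
--             reformatted += b_group[index >> 1]
--
--     return reformatted
-- ===== SOURCE B (Python) =====
-- def ReformatString(s):
--     letters = sum(1 for c in s if 96 < ord(c) < 123)
--     others = len(s) - letters
--     if abs(letters - others) > 1:
--         return ''
--     res = [''] * len(s)
--     i = 0 if letters >= others else 1  # next slot for a lowercase letter
--     j = 1 - i                          # next slot for any other character
--     for c in s:
--         if 96 < ord(c) < 123:
--             res[i] = c
--             i += 2
--         else:
--             res[j] = c
--             j += 2
--     return ''.join(res)
-- ===== Notes on version B (the rewrite author's own statement) =====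
-- stated objective: alternative
-- what changed: B never builds the two group lists or swaps them: it counts lowercase letters in one pass, checks |letters-others|>1, then in a single scan writes each character directly into its final strided slot (letters at positions i0,i0+2,..., others at the opposite parity) of a preallocated result array.
import Mathlib
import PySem

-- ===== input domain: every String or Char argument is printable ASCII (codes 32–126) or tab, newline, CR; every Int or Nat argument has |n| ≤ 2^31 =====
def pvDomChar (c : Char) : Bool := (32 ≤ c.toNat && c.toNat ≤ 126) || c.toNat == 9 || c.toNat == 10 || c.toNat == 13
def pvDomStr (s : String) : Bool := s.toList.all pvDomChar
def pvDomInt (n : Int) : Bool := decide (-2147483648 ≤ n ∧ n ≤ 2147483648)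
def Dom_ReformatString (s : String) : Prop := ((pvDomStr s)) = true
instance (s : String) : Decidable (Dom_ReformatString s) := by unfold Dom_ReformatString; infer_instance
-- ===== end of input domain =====

-- B replaces A's partition/swap/interleave by a count pass plus a single scan writing each
-- character directly into its strided final slot; objective: alternative (same cost).

-- ===== PORT A =====
def ReformatString (s : String) : String :=
  -- the classification loop, building (a_group, b_group)
  let groups := s.toList.foldl
    (fun (g : List Char × List Char) c =>
      if 96 < c.toNat ∧ c.toNat < 123 then (g.1 ++ [c], g.2) else (g.1, g.2 ++ [c]))
    ([], [])
  -- the swap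
  let a_group := if groups.1.length < groups.2.length then groups.2 else groups.1
  let b_group := if groups.1.length < groups.2.length then groups.1 else groups.2
  if (a_group.length : Int) - (b_group.length : Int) > 1 then ""
  else
    -- the interleaving loop over range(len(a)+len(b)); indexing never fails under the guard,
    -- so pyGetD is exact here
    String.ofList ((PySem.List.pyRange 0 ((a_group.length : Int) + (b_group.length : Int)) 1).foldl
      (fun acc i =>
        if PySem.Int.band i 1 = 0 then acc ++ [PySem.List.pyGetD a_group (i >>> (1 : Nat)) ' ']
        else acc ++ [PySem.List.pyGetD b_group (i >>> (1 : Nat)) ' '])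
      [])

-- ===== PORT B =====
def ReformatString_alt (s : String) : String :=
  let l := s.toList
  let letters := l.countP (fun c => decide (96 < c.toNat ∧ c.toNat < 123))
  let others := l.length - letters
  if ((letters : Int) - (others : Int)).natAbs > 1 then ""
  else
    -- res = [''] * len(s); one scan places each char at its strided slot (i letters, j others)
    let r := l.foldl
      (fun (st : List String × Nat × Nat) c =>
        if 96 < c.toNat ∧ c.toNat < 123
        then (st.1.set st.2.1 (String.singleton c), st.2.1 + 2, st.2.2)
        else (st.1.set st.2.2 (String.singleton c), st.2.1, st.2.2 + 2))
      (List.replicate l.length "", (if letters ≥ others then 0 else 1), 1 - (if letters ≥ others then 0 else 1))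
    String.join r.1

-- ===== PRECONDITION & SPEC =====
def Spec_ReformatString (s : String) (out : String) : Prop := out = ReformatString_alt s
instance (s : String) (out : String) : Decidable (Spec_ReformatString s out) := by unfold Spec_ReformatString; infer_instance

-- ===== CLAIM (what is proved, stated in full; the proofs are below) =====
def Claim_equal_ReformatString : Prop := ∀ (s : String), Dom_ReformatString s → Spec_ReformatString s (ReformatString s)

-- ===== LEMMAS AND PROOFS =====

-- A's classification foldl builds the two filters
theorem pv_split (l xa xb : List Char) :
    l.foldl (fun (g : List Char × List Char) c =>
      if 96 < c.toNat ∧ c.toNat < 123 then (g.1 ++ [c], g.2) else (g.1, g.2 ++ [c])) (xa, xb)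
    = (xa ++ l.filter (fun c => decide (96 < c.toNat ∧ c.toNat < 123)),
       xb ++ l.filter (fun c => !(decide (96 < c.toNat ∧ c.toNat < 123)))) := by
  induction l generalizing xa xb with
  | nil => simp
  | cons c l ih =>
    rw [List.foldl_cons]
    by_cases h : 96 < c.toNat ∧ c.toNat < 123
    · rw [if_pos h, ih]
      simp [h]
    · rw [if_neg h, ih]
      simp [List.filter_cons, h]

-- core: A's index-halving map over range(la+lb) equals interleaving with a trailing element
theorem pv_core (b a : List Char) (hba : b.length ≤ a.length) (hab : a.length ≤ b.length + 1) :
    (List.range (a.length + b.length)).map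
      (fun k => if k % 2 = 0 then a.getD (k / 2) ' ' else b.getD (k / 2) ' ')
    = (a.zip b).flatMap (fun p => [p.1, p.2])
      ++ (if b.length < a.length then [a.getLast?.getD ' '] else []) := by
  induction b generalizing a with
  | nil =>
    match a, hab with
    | [], _ => simp
    | [x], _ => simp [List.range_succ]
  | cons y ys ih =>
    cases a with
    | nil => simp at hba
    | cons x xs =>
      have hxs : ys.length ≤ xs.length := by simp only [List.length_cons] at hba; omega
      have hsx : xs.length ≤ ys.length + 1 := by simp only [List.length_cons] at hab; omega
      have hrange : (x :: xs).length + (y :: ys).length = (xs.length + ys.length) + 1 + 1 := by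
        simp only [List.length_cons]; omega
      rw [hrange, List.range_succ_eq_map, List.range_succ_eq_map]
      simp only [List.map_cons, List.map_map]
      have hmap : List.map ((fun k => if k % 2 = 0 then (x :: xs).getD (k / 2) ' '
              else (y :: ys).getD (k / 2) ' ') ∘ Nat.succ ∘ Nat.succ)
            (List.range (xs.length + ys.length))
          = List.map (fun k => if k % 2 = 0 then xs.getD (k / 2) ' ' else ys.getD (k / 2) ' ')
              (List.range (xs.length + ys.length)) := by
        apply List.map_congr_left
        intro k _
        have h2 : (k + 1 + 1) % 2 = k % 2 := by omega
        have h3 : (k + 1 + 1) / 2 = k / 2 + 1 := by omega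
        simp [Function.comp, Nat.succ_eq_add_one, h2, h3]
      rw [hmap, ih xs hxs hsx]
      have hlast : (if ys.length < xs.length then [xs.getLast?.getD ' '] else [])
          = (if (y :: ys).length < (x :: xs).length then [(x :: xs).getLast?.getD ' '] else []) := by
        by_cases h : ys.length < xs.length
        · cases xs with
          | nil => simp at h
          | cons z zs =>
            simp only [List.length_cons] at h
            simp only [List.getLast?_cons_cons, List.length_cons]
            rw [if_pos h, if_pos (by omega)]
        · simp only [List.length_cons]
          rw [if_neg h, if_neg (by omega)]
      simp [hlast]

-- the A-side loop body rewritten with the branch inside the append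
theorem pv_body (a b : List Char) :
    (fun (acc : List Char) (i : Int) =>
      if PySem.Int.band i 1 = 0 then acc ++ [PySem.List.pyGetD a (i >>> (1 : Nat)) ' ']
      else acc ++ [PySem.List.pyGetD b (i >>> (1 : Nat)) ' '])
    = fun acc i => acc ++ [if PySem.Int.band i 1 = 0 then PySem.List.pyGetD a (i >>> (1 : Nat)) ' '
        else PySem.List.pyGetD b (i >>> (1 : Nat)) ' '] := by
  funext acc i
  split <;> rfl

theorem pv_aloop (a b : List Char) :
    (PySem.List.pyRange 0 ((a.length : Int) + (b.length : Int)) 1).foldl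
      (fun acc i =>
        if PySem.Int.band i 1 = 0 then acc ++ [PySem.List.pyGetD a (i >>> (1 : Nat)) ' ']
        else acc ++ [PySem.List.pyGetD b (i >>> (1 : Nat)) ' '])
      []
    = (List.range (a.length + b.length)).map
        (fun k => if k % 2 = 0 then a.getD (k / 2) ' ' else b.getD (k / 2) ' ') := by
  rw [pv_body, PySem.List.foldl_append_singleton_eq_map]
  have h : ((a.length : Int) + (b.length : Int)) = ((a.length + b.length : Nat) : Int) := by
    push_cast; ring
  rw [h, PySem.List.pyRange_zero_nat, List.map_map]
  apply List.map_congr_left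
  intro k _
  have hband : PySem.Int.band (k : Int) 1 = ((k &&& 1 : Nat) : Int) := by
    exact_mod_cast PySem.Int.band_natCast k 1
  have hshift : ((k : Int) >>> (1 : Nat)) = ((k >>> 1 : Nat) : Int) := by
    simp [Int.shiftRight_eq_div_pow, Nat.shiftRight_eq_div_pow]
  have hk1 : (k &&& 1) = k % 2 := Nat.and_one_is_mod k
  have hk2 : (k >>> 1) = k / 2 := by simp [Nat.shiftRight_eq_div_pow]
  simp only [Function.comp_def]
  rw [hband, hshift, hk1, hk2]
  by_cases hk : k % 2 = 0
  · rw [if_pos (by exact_mod_cast hk), if_pos hk, PySem.List.pyGetD_natCast]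
  · rw [if_neg (by exact_mod_cast hk), if_neg hk, PySem.List.pyGetD_natCast]

-- ===== B-side machinery: strided placement =====

-- place the chars of xs at positions i, i+2, i+4, … of r (as singleton strings)
def pvPlace (r : List String) (i : Nat) : List Char → List String
  | [] => r
  | x :: xs => pvPlace (r.set i (String.singleton x)) (i + 2) xs

theorem pv_set_place (xs : List Char) (j : Nat) (y : String) :
    ∀ (r : List String) (i : Nat), i % 2 ≠ j % 2 →
      (pvPlace r i xs).set j y = pvPlace (r.set j y) i xs := by
  induction xs with
  | nil => intro r i _; rfl
  | cons x xs ih =>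
    intro r i h
    simp only [pvPlace]
    rw [ih _ _ (by omega), List.set_comm _ _ (by omega)]

theorem pv_place_comm (ys xs : List Char) (i : Nat) :
    ∀ (r : List String) (j : Nat), i % 2 ≠ j % 2 →
      pvPlace (pvPlace r i xs) j ys = pvPlace (pvPlace r j ys) i xs := by
  induction ys with
  | nil => intro r j _; rfl
  | cons y ys ih =>
    intro r j h
    simp only [pvPlace]
    rw [pv_set_place _ _ _ _ _ h, ih _ _ (by omega)]

-- B's single scan equals placing the two filtered groups at their strides
theorem pv_fold_place (l : List Char) :
    ∀ (r : List String) (i j : Nat), i % 2 ≠ j % 2 →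
    l.foldl
      (fun (st : List String × Nat × Nat) c =>
        if 96 < c.toNat ∧ c.toNat < 123
        then (st.1.set st.2.1 (String.singleton c), st.2.1 + 2, st.2.2)
        else (st.1.set st.2.2 (String.singleton c), st.2.1, st.2.2 + 2))
      (r, i, j)
    = (pvPlace (pvPlace r i (l.filter fun c => decide (96 < c.toNat ∧ c.toNat < 123))) j
         (l.filter fun c => !(decide (96 < c.toNat ∧ c.toNat < 123))),
       i + 2 * (l.countP fun c => decide (96 < c.toNat ∧ c.toNat < 123)),
       j + 2 * (l.countP fun c => !(decide (96 < c.toNat ∧ c.toNat < 123)))) := by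
  induction l with
  | nil => intro r i j _; simp [pvPlace]
  | cons c l ih =>
    intro r i j h
    rw [List.foldl_cons]
    by_cases hc : 96 < c.toNat ∧ c.toNat < 123
    · rw [if_pos hc]
      dsimp only
      rw [ih _ _ _ (by omega)]
      have hc2 : 96 < c.toNat := hc.1
      have hc3 : c.toNat < 123 := hc.2
      refine Prod.ext ?_ (Prod.ext ?_ ?_)
      · simp [pvPlace, hc2, hc3]
      · simp [hc2, hc3]
        omega
      · simp [hc2, hc3]
    · rw [if_neg hc]
      dsimp only
      rw [ih _ _ _ (by omega)]
      have hc' : c.toNat ≤ 96 ∨ 123 ≤ c.toNat := by omega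
      refine Prod.ext ?_ (Prod.ext ?_ ?_)
      · simp [pvPlace, hc, hc', pv_set_place _ _ _ _ _ h]
      · simp [hc]
      · simp [hc']
        omega

theorem pv_place_shift (xs : List Char) (z : String) :
    ∀ (r : List String) (i : Nat), pvPlace (z :: r) (i + 1) xs = z :: pvPlace r i xs := by
  induction xs with
  | nil => intro r i; rfl
  | cons x xs ih =>
    intro r i
    simp only [pvPlace, List.set_cons_succ]
    rw [show i + 1 + 2 = (i + 2) + 1 from by omega]
    exact ih _ (i + 2)

-- placement of the two groups into the blank array is the interleaving (as singleton strings)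
theorem pv_G (b a : List Char) (hba : b.length ≤ a.length) (hab : a.length ≤ b.length + 1) :
    pvPlace (pvPlace (List.replicate (a.length + b.length) "") 0 a) 1 b
    = ((a.zip b).flatMap (fun p => [p.1, p.2])
        ++ (if b.length < a.length then [a.getLast?.getD ' '] else [])).map String.singleton := by
  induction b generalizing a with
  | nil =>
    match a, hab with
    | [], _ => rfl
    | [x], _ => simp [pvPlace]
  | cons y ys ih =>
    cases a with
    | nil => simp at hba
    | cons x xs =>
      have hxs : ys.length ≤ xs.length := by simp only [List.length_cons] at hba; omega
      have hsx : xs.length ≤ ys.length + 1 := by simp only [List.length_cons] at hab; omega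
      have hrep : List.replicate ((x :: xs).length + (y :: ys).length) ("" : String)
          = "" :: "" :: List.replicate (xs.length + ys.length) "" := by
        simp only [List.length_cons]
        rw [show xs.length + 1 + (ys.length + 1) = (xs.length + ys.length) + 1 + 1 by omega]
        rfl
      rw [hrep]
      show pvPlace (pvPlace ((("" : String) :: "" :: List.replicate (xs.length + ys.length) "").set 0
            (String.singleton x)) (0 + 2) xs) 1 (y :: ys) = _
      simp only [List.set_cons_zero]
      rw [show (0 + 2 : Nat) = 1 + 1 from rfl, pv_place_shift]
      simp only [pvPlace, List.set_cons_succ]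
      rw [show (1 : Nat) = 0 + 1 from rfl, pv_place_shift,
        pv_set_place _ _ _ _ _ (by omega), List.set_cons_zero,
        pv_place_shift, show (2 : Nat) = 1 + 1 from rfl, pv_place_shift, ih xs hxs hsx]
      have hlast : (if ys.length < xs.length then [xs.getLast?.getD ' '] else [])
          = (if (y :: ys).length < (x :: xs).length then [(x :: xs).getLast?.getD ' '] else []) := by
        by_cases h : ys.length < xs.length
        · cases xs with
          | nil => simp at h
          | cons z zs =>
            simp only [List.length_cons] at h
            simp only [List.getLast?_cons_cons, List.length_cons]
            rw [if_pos h, if_pos (by omega)]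
        · simp only [List.length_cons]
          rw [if_neg h, if_neg (by omega)]
      simp [hlast]

theorem pv_join_singleton (cs : List Char) :
    String.join (cs.map String.singleton) = String.ofList cs := by
  rw [← String.toList_inj, String.toList_join]
  simp only [List.map_map, Function.comp_def, String.toList_singleton, String.toList_ofList]
  induction cs with
  | nil => rfl
  | cons c cs ih => simp [ih]

theorem pv_filter_length (l : List Char) (p : Char → Bool) :
    (l.filter p).length + (l.filter fun c => !p c).length = l.length := by
  induction l with
  | nil => rfl
  | cons c l ih =>
    by_cases h : p c <;> simp [h] <;> omega

-- ===== VERDICT (by name: the statement is the Claim_ definition above) =====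
theorem ReformatString_spec : Claim_equal_ReformatString := by
  intro s _
  unfold Spec_ReformatString ReformatString ReformatString_alt
  rw [pv_split]
  simp only [List.nil_append]
  set l := s.toList with hl
  set fa := l.filter (fun c => decide (96 < c.toNat ∧ c.toNat < 123)) with hfa
  set fb := l.filter (fun c => !(decide (96 < c.toNat ∧ c.toNat < 123))) with hfb
  have hcnt : (l.countP fun c => decide (96 < c.toNat ∧ c.toNat < 123)) = fa.length :=
    List.countP_eq_length_filter
  have hlen : fa.length + fb.length = l.length := pv_filter_length l _
  rw [hcnt, ← hlen]
  have hsub : fa.length + fb.length - fa.length = fb.length := by omega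
  rw [hsub]
  by_cases hswap : fa.length < fb.length
  · rw [if_pos hswap, if_pos hswap]
    by_cases hg : (fb.length : Int) - (fa.length : Int) > 1
    · rw [if_pos hg, if_pos (show (((fa.length : Int) - (fb.length : Int)).natAbs > 1) by omega)]
    · rw [if_neg hg, if_neg (show ¬(((fa.length : Int) - (fb.length : Int)).natAbs > 1) by omega)]
      have hba : fa.length ≤ fb.length := by omega
      have hab : fb.length ≤ fa.length + 1 := by omega
      rw [pv_aloop fb fa, pv_core fa fb hba hab,
        if_neg (show ¬(fa.length ≥ fb.length) by omega),
        pv_fold_place l _ 1 (1 - 1) (by omega)]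
      simp only [← hfa, ← hfb]
      rw [show (1 - 1 : Nat) = 0 from rfl, pv_place_comm fb fa 1 _ 0 (by omega),
        Nat.add_comm fa.length fb.length, pv_G fa fb hba hab, pv_join_singleton]
  · rw [if_neg hswap, if_neg hswap]
    by_cases hg : (fa.length : Int) - (fb.length : Int) > 1
    · rw [if_pos hg, if_pos (show (((fa.length : Int) - (fb.length : Int)).natAbs > 1) by omega)]
    · rw [if_neg hg, if_neg (show ¬(((fa.length : Int) - (fb.length : Int)).natAbs > 1) by omega)]
      have hba : fb.length ≤ fa.length := by omega
      have hab : fa.length ≤ fb.length + 1 := by omega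
      rw [pv_aloop fa fb, pv_core fb fa hba hab,
        if_pos (show fa.length ≥ fb.length by omega),
        pv_fold_place l _ 0 (1 - 0) (by omega)]
      simp only [← hfa, ← hfb]
      rw [show (1 - 0 : Nat) = 1 from rfl, pv_G fb fa hba hab, pv_join_singleton]
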